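-- pv_equiv track=rewrite | github.com/altereitay/SciSimplify | simplify.py | concat_terms
-- ===== SOURCE A (Python) =====
-- def concat_terms(li): # concat two adjacent terms
--     final_terms = []
--     index = 0
--     size = len(li)
--     while index < size:
--         new_term = {}
--         start = li[index]['start']
--         new_term['start'] = start
--         end = li[index]['end']
--         index += 1
--         while index < size and end + 1 == li[index]['start']:
--             end = li[index]['end']
--             index += 1
--         new_term['end'] = end
--         final_terms.append(new_term)
--     return final_terms
-- ===== SOURCE B (Python) =====
-- def concat_terms(li):
--     out = []
--     cur = None  # pending (start, end) interval not yet emitted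
--     for t in li:
--         if cur is not None and cur[1] + 1 == t['start']:
--             cur = (cur[0], t['end'])
--         else:
--             if cur is not None:
--                 out.append({'start': cur[0], 'end': cur[1]})
--             cur = (t['start'], t['end'])
--     if cur is not None:
--         out.append({'start': cur[0], 'end': cur[1]})
--     return out
-- ===== Notes on version B (the rewrite author's own statement) =====
-- stated objective: simpler
-- what changed: Replaces A's nested while-loops with manual index arithmetic by a single for-loop carrying one pending (start, end) pair that is extended or flushed, emitted once at the end.
import Mathlib
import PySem

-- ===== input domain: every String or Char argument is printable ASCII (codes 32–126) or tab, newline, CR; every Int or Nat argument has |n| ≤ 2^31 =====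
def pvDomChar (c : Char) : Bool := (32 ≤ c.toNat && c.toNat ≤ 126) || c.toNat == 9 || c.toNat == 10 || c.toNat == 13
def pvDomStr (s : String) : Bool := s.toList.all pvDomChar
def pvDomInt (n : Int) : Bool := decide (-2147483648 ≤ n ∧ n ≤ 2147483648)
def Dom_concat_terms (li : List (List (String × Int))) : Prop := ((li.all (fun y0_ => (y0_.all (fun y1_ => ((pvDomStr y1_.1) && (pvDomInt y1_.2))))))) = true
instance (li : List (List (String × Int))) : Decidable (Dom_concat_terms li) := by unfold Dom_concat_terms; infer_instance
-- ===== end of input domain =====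

-- B replaces A's nested while-loops and index arithmetic by one pass carrying a pending
-- (start, end) interval; same return value, no mutation of the input (neither version mutates it).

-- dict lookup d[k] for the dicts in li (Pre_ guarantees the key is present, so the default is never used inside Pre_)
def pvGetKey (d : List (String × Int)) (k : String) : Int :=
  ((PySem.Dict.mk d).get? k).getD 0

-- ===== PORT A =====
-- inner 'while index < size and end + 1 == li[index]["start"]' loop: returns the final end and the unconsumed suffix
def concatA_inner (e : Int) (rest : List (List (String × Int))) : Int × List (List (String × Int)) :=
  match rest with
  | [] => (e, [])
  | t :: ts =>
    if e + 1 = pvGetKey t "start" then concatA_inner (pvGetKey t "end") ts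
    else (e, t :: ts)

theorem concatA_inner_len (e : Int) (rest : List (List (String × Int))) :
    (concatA_inner e rest).2.length ≤ rest.length := by
  induction rest generalizing e with
  | nil => simp [concatA_inner]
  | cons t ts ih =>
    simp only [concatA_inner]
    split
    · exact le_trans (ih _) (Nat.le_succ _)
    · simp

-- outer 'while index < size' loop
def concat_terms_loop (rest : List (List (String × Int))) : List (List (String × Int)) :=
  match rest with
  | [] => []
  | t :: ts =>
    let start := pvGetKey t "start"
    let r := concatA_inner (pvGetKey t "end") ts
    [("start", start), ("end", r.1)] :: concat_terms_loop r.2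
  termination_by rest.length
  decreasing_by exact Nat.lt_succ_of_le (concatA_inner_len _ _)

def concat_terms (li : List (List (String × Int))) : List (List (String × Int)) :=
  concat_terms_loop li

-- ===== PORT B =====
-- state = (emitted output, pending interval); one fold step per input term
def concatB_step (st : List (List (String × Int)) × Option (Int × Int)) (t : List (String × Int)) :
    List (List (String × Int)) × Option (Int × Int) :=
  match st.2 with
  | some c =>
    if c.2 + 1 = pvGetKey t "start" then (st.1, some (c.1, pvGetKey t "end"))
    else (st.1 ++ [[("start", c.1), ("end", c.2)]], some (pvGetKey t "start", pvGetKey t "end"))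
  | none => (st.1, some (pvGetKey t "start", pvGetKey t "end"))

def concatB_flush (st : List (List (String × Int)) × Option (Int × Int)) :
    List (List (String × Int)) :=
  match st.2 with
  | none => st.1
  | some c => st.1 ++ [[("start", c.1), ("end", c.2)]]

def concat_terms_alt (li : List (List (String × Int))) : List (List (String × Int)) :=
  concatB_flush (li.foldl concatB_step ([], none))

-- ===== PRECONDITION & SPEC =====
-- Pre_ excludes exactly the inputs where A raises KeyError: some dict lacks the key "start" or "end".
def Pre_concat_terms (li : List (List (String × Int))) : Prop :=
  (li.all (fun d => ((PySem.Dict.mk d).get? "start").isSome &&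
                    ((PySem.Dict.mk d).get? "end").isSome)) = true
instance (li : List (List (String × Int))) : Decidable (Pre_concat_terms li) := by
  unfold Pre_concat_terms; infer_instance

def pvWitness_concat_terms : (List (List (String × Int))) :=
  [[("start", 1), ("end", 2)], [("start", 3), ("end", 5)], [("start", 9), ("end", 9)]]

def Spec_concat_terms (li : List (List (String × Int))) (out : List (List (String × Int))) : Prop := out = concat_terms_alt li
instance (li : List (List (String × Int))) (out : List (List (String × Int))) : Decidable (Spec_concat_terms li out) := by unfold Spec_concat_terms; infer_instance

-- ===== CLAIM (what is proved, stated in full; the proofs are below) =====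
def Claim_equal_concat_terms : Prop := ∀ (li : List (List (String × Int))), Dom_concat_terms li → Pre_concat_terms li → Spec_concat_terms li (concat_terms li)

-- ===== LEMMAS AND PROOFS =====

-- invariant: once B holds a pending interval (s, e), finishing the fold over rest and flushing
-- yields the already-emitted output followed by A's group starting at s.
theorem concatB_main (rest : List (List (String × Int)))
    (out : List (List (String × Int))) (s e : Int) :
    concatB_flush (rest.foldl concatB_step (out, some (s, e))) =
      out ++ ([("start", s), ("end", (concatA_inner e rest).1)] ::
              concat_terms_loop (concatA_inner e rest).2) := by
  induction rest generalizing out s e with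
  | nil => simp [concatA_inner, concatB_flush, concat_terms_loop]
  | cons t ts ih =>
    simp only [List.foldl_cons, concatB_step, concatA_inner]
    by_cases h : e + 1 = pvGetKey t "start"
    · simp only [h, reduceIte, ih]
    · simp only [if_neg h, ih, concat_terms_loop, List.append_assoc, List.cons_append,
        List.nil_append]

-- ===== VERDICT (by name: the statement is the Claim_ definition above) =====
theorem concat_terms_spec : Claim_equal_concat_terms := by
  intro li _ _
  unfold Spec_concat_terms concat_terms concat_terms_alt
  cases li with
  | nil => simp [concat_terms_loop, concatB_flush]
  | cons t ts =>
    simp only [concat_terms_loop, List.foldl_cons, concatB_step, concatB_main,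
      List.nil_append]
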